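-- pv_equiv track=rewrite | github.com/preem-BD/fake-news-detector | src/llm_helper.py | detect_clickbait_in_title
-- ===== SOURCE A (Python) =====
-- CLICKBAIT_WORDS = [
--     "shocking", "unbelievable", "you won't believe", "secret", "exposed", "surprising",
--     "this will change", "the truth about", "miracle", "guaranteed", "instantly", "click here"
-- ]
--
-- def detect_clickbait_in_title(title):
--     """
--     Detect potential clickbait characteristics in article titles.
--
--     This function uses a rule-based approach to identify common clickbait patterns
--     by checking for sensationalized words and phrases commonly used in misleading
--     or exaggerated headlines.
--
--     Args:
--         title (str): Article title to analyze
--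
--     Returns:
--         str: "Clickbait" if clickbait patterns detected, "Not Clickbait" otherwise
--
--     Example:
--         >>> detect_clickbait_in_title("You won't believe this shocking discovery!")
--         "Clickbait"
--         >>> detect_clickbait_in_title("Scientists publish new research findings")
--         "Not Clickbait"
--     """
--     # Convert to lowercase for case-insensitive matching
--     title_lower = title.lower()
--
--     # Check if any clickbait words/phrases are present in the title
--     found_words = [word for word in CLICKBAIT_WORDS if word in title_lower]
--
--     # Classify based on presence of clickbait patterns
--     if found_words:
--         result = "Clickbait"
--     else:
--         result = "Not Clickbait"
--
--     return result
-- ===== SOURCE B (Python) =====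
-- CLICKBAIT_WORDS = [
--     "shocking", "unbelievable", "you won't believe", "secret", "exposed", "surprising",
--     "this will change", "the truth about", "miracle", "guaranteed", "instantly", "click here"
-- ]
--
-- def detect_clickbait_in_title(title):
--     # Single left-to-right scan: at each position, test whether any phrase starts there.
--     t = title.lower()
--     for i in range(len(t)):
--         for w in CLICKBAIT_WORDS:
--             if t.startswith(w, i):
--                 return "Clickbait"
--     return "Not Clickbait"
-- ===== Notes on version B (the rewrite author's own statement) =====
-- stated objective: alternative
-- what changed: Replaced the per-phrase substring-containment loop that builds a list of matched phrases with a single left-to-right scan over title positions, testing at each position whether any phrase starts there and returning early on the first hit.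
import Mathlib
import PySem

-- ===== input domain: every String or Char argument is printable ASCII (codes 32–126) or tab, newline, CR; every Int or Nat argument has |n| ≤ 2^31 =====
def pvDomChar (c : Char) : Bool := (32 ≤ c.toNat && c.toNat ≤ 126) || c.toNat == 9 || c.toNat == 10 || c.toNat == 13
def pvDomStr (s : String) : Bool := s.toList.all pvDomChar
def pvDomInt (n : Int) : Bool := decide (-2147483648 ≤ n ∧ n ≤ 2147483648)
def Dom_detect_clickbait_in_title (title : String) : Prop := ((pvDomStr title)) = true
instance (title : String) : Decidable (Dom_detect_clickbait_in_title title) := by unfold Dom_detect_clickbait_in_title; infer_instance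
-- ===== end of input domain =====

-- B replaces A's per-phrase 'w in title' searches with one positional scan using startswith; alternative structure, same results.

def CLICKBAIT_WORDS : List String :=
  ["shocking", "unbelievable", "you won't believe", "secret", "exposed", "surprising",
   "this will change", "the truth about", "miracle", "guaranteed", "instantly", "click here"]

-- ===== PORT A =====
def detect_clickbait_in_title (title : String) : String :=
  let title_lower := PySem.Str.lower title
  let found_words := CLICKBAIT_WORDS.filter (fun word => PySem.Str.isIn word title_lower)
  if found_words.isEmpty then "Not Clickbait" else "Clickbait"

-- ===== PORT B =====
-- t.startswith(w, i) with 0 ≤ i is exactly Chars.startswith on (t.drop i)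
def detect_clickbait_in_title_alt (title : String) : String :=
  let t := (PySem.Str.lower title).toList
  if (List.range t.length).any (fun i =>
       CLICKBAIT_WORDS.any (fun w => PySem.Chars.startswith (t.drop i) w.toList))
  then "Clickbait" else "Not Clickbait"

-- ===== PRECONDITION & SPEC =====
def Spec_detect_clickbait_in_title (title : String) (out : String) : Prop := out = detect_clickbait_in_title_alt title
instance (title : String) (out : String) : Decidable (Spec_detect_clickbait_in_title title out) := by unfold Spec_detect_clickbait_in_title; infer_instance

-- ===== CLAIM (what is proved, stated in full; the proofs are below) =====
def Claim_equal_detect_clickbait_in_title : Prop := ∀ (title : String), Dom_detect_clickbait_in_title title → Spec_detect_clickbait_in_title title (detect_clickbait_in_title title)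

-- ===== LEMMAS AND PROOFS =====

-- for a nonempty pattern, 'some position of t starts with w' is exactly 'w in t'
lemma scan_eq_isIn (t w : List Char) (hw : w ≠ []) :
    ((List.range t.length).any (fun i => PySem.Chars.startswith (t.drop i) w))
      = PySem.Chars.isIn w t := by
  rcases h : PySem.Chars.isIn w t with _ | _
  · simp only [List.any_eq_false]
    intro i hi
    simp only [← Bool.not_eq_true] at *
    intro hs
    rw [PySem.Chars.startswith_iff] at hs
    have : (∃ j, w <+: t.drop j) := ⟨i, hs⟩
    rw [PySem.Chars.exists_prefix_drop_iff_isIn] at this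
    simp [this] at h
  · rw [← PySem.Chars.exists_prefix_drop_iff_isIn] at h
    obtain ⟨j, hj⟩ := h
    have hjlt : j < t.length := by
      by_contra hge
      rw [not_lt] at hge
      rw [List.drop_eq_nil_of_le hge] at hj
      exact hw (List.prefix_nil.mp hj)
    simp only [List.any_eq_true]
    exact ⟨j, by simpa using hjlt, by rw [PySem.Chars.startswith_iff]; exact hj⟩

lemma words_exist_iff (t : List Char) :
    ((List.range t.length).any (fun i =>
        CLICKBAIT_WORDS.any (fun w => PySem.Chars.startswith (t.drop i) w.toList)))
      = CLICKBAIT_WORDS.any (fun w => PySem.Chars.isIn w.toList t) := by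
  rcases h : CLICKBAIT_WORDS.any (fun w => PySem.Chars.isIn w.toList t) with _ | _
  · simp only [List.any_eq_false] at h ⊢
    intro i hi hb
    obtain ⟨w, hw, hs⟩ := List.any_eq_true.mp hb
    have hwne : w.toList ≠ [] := by fin_cases hw <;> decide
    have := h w hw
    rw [← scan_eq_isIn t w.toList hwne] at this
    exact this (List.any_eq_true.mpr ⟨i, hi, hs⟩)
  · simp only [List.any_eq_true] at h
    obtain ⟨w, hw, hin⟩ := h
    have hwne : w.toList ≠ [] := by fin_cases hw <;> decide
    rw [← scan_eq_isIn t w.toList hwne] at hin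
    simp only [List.any_eq_true] at hin ⊢
    obtain ⟨i, hi, hs⟩ := hin
    exact ⟨i, hi, w, hw, hs⟩

lemma main_eq (t : List Char) :
    (if (CLICKBAIT_WORDS.filter (fun word => PySem.Chars.isIn word.toList t)).isEmpty
       then ("Not Clickbait" : String) else "Clickbait")
    = (if (List.range t.length).any (fun i =>
          CLICKBAIT_WORDS.any (fun w => PySem.Chars.startswith (t.drop i) w.toList))
       then "Clickbait" else "Not Clickbait") := by
  rw [words_exist_iff]
  rcases h : CLICKBAIT_WORDS.any (fun w => PySem.Chars.isIn w.toList t) with _ | _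
  · have : CLICKBAIT_WORDS.filter (fun word => PySem.Chars.isIn word.toList t) = [] := by
      rw [List.filter_eq_nil_iff]
      simpa only [List.any_eq_false] using h
    simp [this]
  · have : (CLICKBAIT_WORDS.filter (fun word => PySem.Chars.isIn word.toList t)).isEmpty = false := by
      simp only [List.any_eq_true] at h
      obtain ⟨w, hw, hin⟩ := h
      simp only [List.isEmpty_eq_false_iff, ne_eq, List.filter_eq_nil_iff, not_forall]
      exact ⟨w, hw, by simp [hin]⟩
    simp [this]

-- ===== VERDICT (by name: the statement is the Claim_ definition above) =====
theorem detect_clickbait_in_title_spec : Claim_equal_detect_clickbait_in_title := by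
  intro title _
  unfold Spec_detect_clickbait_in_title detect_clickbait_in_title detect_clickbait_in_title_alt
  simp only [PySem.Str.isIn_eq]
  exact main_eq ((PySem.Str.lower title).toList)
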